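-- pv_equiv track=rewrite | github.com/onstonboy/cursorflow | generate_prompt.py | _infer_language_from_description
-- ===== SOURCE A (Python) =====
-- def _infer_language_from_description(description: str) -> str:
--     """Best-effort inference of language/framework from a project description."""
--     text = description.lower()
--
--     mobile_keywords = ['mobile app', 'ios app', 'android app', 'react native']
--     web_keywords = ['web app', 'website', 'web application', 'spa', 'react', 'next.js', 'vue', 'angular']
--     backend_keywords = ['api', 'backend', 'microservice', 'server']
--
--     if 'flutter' in text or 'dart' in text:
--         return 'flutter'
--     if 'react native' in text:
--         return 'react'
--     if 'jetpack compose' in text or 'android' in text or 'kotlin' in text: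
--         return 'kotlin'
--     if 'swiftui' in text or 'swift' in text or 'ios' in text:
--         return 'swift'
--     if any(k in text for k in web_keywords):
--         return 'react'
--     if any(k in text for k in backend_keywords):
--         return 'python'
--     if any(k in text for k in mobile_keywords):
--         return 'flutter'
--
--     # Default choice: React/TypeScript for generic projects
--     return 'react'
-- ===== SOURCE B (Python) =====
-- # Aggregate-then-select: collect the ranks of ALL matched keywords in one pass,
-- # then return the label of the minimum rank (instead of a cascade of early returns).
-- _KEYWORD_RANK = {
--     'flutter': (0, 'flutter'), 'dart': (0, 'flutter'),
--     'react native': (1, 'react'),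
--     'jetpack compose': (2, 'kotlin'), 'android': (2, 'kotlin'), 'kotlin': (2, 'kotlin'),
--     'swiftui': (3, 'swift'), 'swift': (3, 'swift'), 'ios': (3, 'swift'),
--     'web app': (4, 'react'), 'website': (4, 'react'), 'web application': (4, 'react'),
--     'spa': (4, 'react'), 'react': (4, 'react'), 'next.js': (4, 'react'),
--     'vue': (4, 'react'), 'angular': (4, 'react'),
--     'api': (5, 'python'), 'backend': (5, 'python'),
--     'microservice': (5, 'python'), 'server': (5, 'python'),
--     'mobile app': (6, 'flutter'), 'ios app': (6, 'flutter'), 'android app': (6, 'flutter'),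
-- }
--
--
-- def _infer_language_from_description(description: str) -> str:
--     text = description.lower()
--     matches = [rl for kw, rl in _KEYWORD_RANK.items() if kw in text]
--     return min(matches, key=lambda rl: rl[0], default=(7, 'react'))[1]
-- ===== Notes on version B (the rewrite author's own statement) =====
-- stated objective: alternative
-- what changed: Instead of A's cascade of early-return branch tests, B maps every keyword to a (rank, label) priority in one dict, collects the ranks of ALL keywords matching the lowercased text in a single pass, and returns the label of the minimum rank (default (7,'react')); correct because A's branch order is exactly the rank order.
import Mathlib
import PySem

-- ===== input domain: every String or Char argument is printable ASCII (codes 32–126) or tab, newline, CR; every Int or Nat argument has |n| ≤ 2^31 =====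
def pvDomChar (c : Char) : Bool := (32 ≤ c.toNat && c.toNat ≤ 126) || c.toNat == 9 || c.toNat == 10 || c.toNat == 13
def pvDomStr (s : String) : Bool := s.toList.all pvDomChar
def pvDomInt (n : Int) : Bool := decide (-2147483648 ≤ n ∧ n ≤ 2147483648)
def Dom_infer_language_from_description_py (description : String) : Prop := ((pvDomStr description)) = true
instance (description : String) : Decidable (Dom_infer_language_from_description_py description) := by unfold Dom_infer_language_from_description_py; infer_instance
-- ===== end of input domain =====

-- B collects the ranks of all matched keywords in one pass over a keyword->(rank,label) map and returns the label of the minimum rank, instead of A's cascade of early-return branch tests (same cost; alternative algorithm).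


-- ===== PORT A =====
def infer_language_from_description_py (description : String) : String :=
  let text := PySem.Str.lower description
  let mobile_keywords := ["mobile app", "ios app", "android app", "react native"]
  let web_keywords := ["web app", "website", "web application", "spa", "react", "next.js", "vue", "angular"]
  let backend_keywords := ["api", "backend", "microservice", "server"]
  if PySem.Str.isIn "flutter" text || PySem.Str.isIn "dart" text then "flutter"
  else if PySem.Str.isIn "react native" text then "react"
  else if PySem.Str.isIn "jetpack compose" text || PySem.Str.isIn "android" text || PySem.Str.isIn "kotlin" text then "kotlin"
  else if PySem.Str.isIn "swiftui" text || PySem.Str.isIn "swift" text || PySem.Str.isIn "ios" text then "swift"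
  else if web_keywords.any (fun k => PySem.Str.isIn k text) then "react"
  else if backend_keywords.any (fun k => PySem.Str.isIn k text) then "python"
  else if mobile_keywords.any (fun k => PySem.Str.isIn k text) then "flutter"
  else "react"

-- ===== PORT B =====
-- the _KEYWORD_RANK dict of Source B, in insertion order
def pvKeywordRank : List (String × Int × String) :=
  [ ("flutter", 0, "flutter"), ("dart", 0, "flutter"),
    ("react native", 1, "react"),
    ("jetpack compose", 2, "kotlin"), ("android", 2, "kotlin"), ("kotlin", 2, "kotlin"),
    ("swiftui", 3, "swift"), ("swift", 3, "swift"), ("ios", 3, "swift"),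
    ("web app", 4, "react"), ("website", 4, "react"), ("web application", 4, "react"),
    ("spa", 4, "react"), ("react", 4, "react"), ("next.js", 4, "react"),
    ("vue", 4, "react"), ("angular", 4, "react"),
    ("api", 5, "python"), ("backend", 5, "python"),
    ("microservice", 5, "python"), ("server", 5, "python"),
    ("mobile app", 6, "flutter"), ("ios app", 6, "flutter"), ("android app", 6, "flutter") ]

def infer_language_from_description_py_alt (description : String) : String :=
  let text := PySem.Str.lower description
  -- matches = [rl for kw, rl in _KEYWORD_RANK.items() if kw in text]
  let ms := (pvKeywordRank.filter (fun e : String × Int × String => PySem.Str.isIn e.1 text)).map (fun e : String × Int × String => e.2)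
  -- min(matches, key=lambda rl: rl[0], default=(7,'react'))[1]  (Python min: first minimal)
  (match ms with
   | [] => ((7 : Int), "react")
   | h :: t => t.foldl (fun (b p : Int × String) => if p.1 < b.1 then p else b) h).2

-- ===== PRECONDITION & SPEC =====
def Spec_infer_language_from_description_py (description : String) (out : String) : Prop := out = infer_language_from_description_py_alt description
instance (description : String) (out : String) : Decidable (Spec_infer_language_from_description_py description out) := by unfold Spec_infer_language_from_description_py; infer_instance

-- ===== CLAIM (what is proved, stated in full; the proofs are below) =====
def Claim_equal_infer_language_from_description_py : Prop := ∀ (description : String), Dom_infer_language_from_description_py description → Spec_infer_language_from_description_py description (infer_language_from_description_py description)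

-- ===== LEMMAS AND PROOFS =====

-- folding strict min over a list that never goes below the accumulator keeps the accumulator
theorem pv_foldmin_head (t : List (Int × String)) (h : Int × String)
    (hh : ∀ p ∈ t, ¬ p.1 < h.1) :
    t.foldl (fun b p => if p.1 < b.1 then p else b) h = h := by
  induction t with
  | nil => rfl
  | cons a t ih =>
    simp only [List.foldl_cons]
    rw [if_neg (hh a (by simp))]
    exact ih (fun p hp => hh p (by simp [hp]))

-- on a rank-sorted table, "min rank among matches" = "first match"
theorem pv_min_eq_find (l : List (String × Int × String)) (q : String → Bool)
    (hs : l.Pairwise (fun a b => a.2.1 ≤ b.2.1)) :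
    (match (l.filter (fun e : String × Int × String => q e.1)).map (fun e : String × Int × String => e.2) with
     | [] => ((7 : Int), "react")
     | h :: t => t.foldl (fun (b p : Int × String) => if p.1 < b.1 then p else b) h).2
    = (match l.find? (fun e => q e.1) with
       | some e => e.2.2
       | none => "react") := by
  induction l with
  | nil => rfl
  | cons a l ih =>
    rcases List.pairwise_cons.mp hs with ⟨ha, hl⟩
    by_cases hq : q a.1 = true
    · simp only [List.filter_cons, List.find?_cons, hq, if_true, List.map_cons]
      rw [pv_foldmin_head]
      intro p hp
      simp only [List.mem_map, List.mem_filter] at hp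
      rcases hp with ⟨e, ⟨he, _⟩, rfl⟩
      have := ha e he
      omega
    · simp only [List.filter_cons, List.find?_cons, hq]
      simp only [Bool.not_eq_true] at hq
      simp [ih hl]

-- ===== VERDICT (by name: the statement is the Claim_ definition above) =====
theorem infer_language_from_description_py_spec : Claim_equal_infer_language_from_description_py := by
  intro description _
  unfold Spec_infer_language_from_description_py infer_language_from_description_py infer_language_from_description_py_alt
  have hs : pvKeywordRank.Pairwise (fun a b => a.2.1 ≤ b.2.1) := by decide
  rw [pv_min_eq_find pvKeywordRank (fun k => PySem.Str.isIn k (PySem.Str.lower description)) hs]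
  simp only [pvKeywordRank]
  generalize PySem.Str.lower description = t
  cases h0 : PySem.Str.isIn "flutter" t <;> (try simp_all) <;>
  cases h1 : PySem.Str.isIn "dart" t <;> (try simp_all) <;>
  cases h2 : PySem.Str.isIn "react native" t <;> (try simp_all) <;>
  cases h3 : PySem.Str.isIn "jetpack compose" t <;> (try simp_all) <;>
  cases h4 : PySem.Str.isIn "android" t <;> (try simp_all) <;>
  cases h5 : PySem.Str.isIn "kotlin" t <;> (try simp_all) <;>
  cases h6 : PySem.Str.isIn "swiftui" t <;> (try simp_all) <;>
  cases h7 : PySem.Str.isIn "swift" t <;> (try simp_all) <;>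
  cases h8 : PySem.Str.isIn "ios" t <;> (try simp_all) <;>
  cases h9 : PySem.Str.isIn "web app" t <;> (try simp_all) <;>
  cases h10 : PySem.Str.isIn "website" t <;> (try simp_all) <;>
  cases h11 : PySem.Str.isIn "web application" t <;> (try simp_all) <;>
  cases h12 : PySem.Str.isIn "spa" t <;> (try simp_all) <;>
  cases h13 : PySem.Str.isIn "react" t <;> (try simp_all) <;>
  cases h14 : PySem.Str.isIn "next.js" t <;> (try simp_all) <;>
  cases h15 : PySem.Str.isIn "vue" t <;> (try simp_all) <;>
  cases h16 : PySem.Str.isIn "angular" t <;> (try simp_all) <;>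
  cases h17 : PySem.Str.isIn "api" t <;> (try simp_all) <;>
  cases h18 : PySem.Str.isIn "backend" t <;> (try simp_all) <;>
  cases h19 : PySem.Str.isIn "microservice" t <;> (try simp_all) <;>
  cases h20 : PySem.Str.isIn "server" t <;> (try simp_all) <;>
  cases h21 : PySem.Str.isIn "mobile app" t <;> (try simp_all) <;>
  cases h22 : PySem.Str.isIn "ios app" t <;> (try simp_all) <;>
  cases h23 : PySem.Str.isIn "android app" t <;> (try simp_all)
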